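-- pv_equiv track=rewrite | github.com/farazzorofchi/Web-Scraping-compiling-accounting-and-auditing-enforcement | Web_Scraping.py | change_link_name
-- ===== SOURCE A (Python) =====
-- def change_link_name(link):
--     temp = link.split("/")[-4:]
--     test = ''
--     for i in temp:
--         test = test + '-' + i
--
--     test = test.replace("-", "_")
--     test = test.replace(":", "_")
--     test = test.replace(".", "_")
--     return (test)
-- ===== SOURCE B (Python) =====
-- def change_link_name(link):
--     # Single pass per character: map each of '-', ':', '.' to '_' while joining,
--     # instead of building the string and rescanning it three times with replace.
--     return ''.join('_' + ''.join('_' if c in '-:.' else c for c in seg)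
--                    for seg in link.split('/')[-4:])
-- ===== Notes on version B (the rewrite author's own statement) =====
-- stated objective: idiomatic
-- what changed: B joins the last four path segments while translating '-', ':' and '.' to '_' in a single pass per character (one generator-join), instead of A's accumulator loop followed by three whole-string replace scans.
import Mathlib
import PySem

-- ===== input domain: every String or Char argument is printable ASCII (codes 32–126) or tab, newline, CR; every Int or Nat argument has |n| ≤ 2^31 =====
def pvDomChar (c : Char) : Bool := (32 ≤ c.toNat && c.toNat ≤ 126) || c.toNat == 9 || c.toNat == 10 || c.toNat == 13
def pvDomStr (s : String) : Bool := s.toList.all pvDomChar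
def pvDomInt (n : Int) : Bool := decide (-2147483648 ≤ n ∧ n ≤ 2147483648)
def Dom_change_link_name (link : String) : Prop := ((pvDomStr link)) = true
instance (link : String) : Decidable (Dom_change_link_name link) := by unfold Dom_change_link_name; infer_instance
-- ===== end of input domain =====

-- B joins the last four '/'-segments while translating '-', ':' and '.' to '_' in one
-- pass per character, instead of A's accumulator loop plus three whole-string replace scans.

-- ===== PORT A =====
def change_link_name (link : String) : String :=
  let temp := PySem.List.slice (PySem.Chars.splitOn link.toList ['/']) (some (-4)) none
  let test := temp.foldl (fun test i => test ++ '-' :: i) []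
  let test := PySem.Chars.replace test ['-'] ['_']
  let test := PySem.Chars.replace test [':'] ['_']
  let test := PySem.Chars.replace test ['.'] ['_']
  String.ofList test

-- ===== PORT B =====
-- '_' if c in '-:.' else c
def pvTr (c : Char) : Char := if c = '-' ∨ c = ':' ∨ c = '.' then '_' else c

def change_link_name_alt (link : String) : String :=
  String.ofList (PySem.Chars.join []
    ((PySem.List.slice (PySem.Chars.splitOn link.toList ['/']) (some (-4)) none).map
      (fun seg => '_' :: seg.map pvTr)))

-- ===== PRECONDITION & SPEC =====
def Spec_change_link_name (link : String) (out : String) : Prop := out = change_link_name_alt link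
instance (link : String) (out : String) : Decidable (Spec_change_link_name link out) := by unfold Spec_change_link_name; infer_instance

-- ===== CLAIM (what is proved, stated in full; the proofs are below) =====
def Claim_equal_change_link_name : Prop := ∀ (link : String), Dom_change_link_name link → Spec_change_link_name link (change_link_name link)

-- ===== LEMMAS AND PROOFS =====

-- replace with a single-char pattern is a character map
theorem replace_go_single (a b : Char) :
    ∀ (l acc : List Char) (fuel : Nat), l.length ≤ fuel →
      PySem.Chars.replace.go [a] [b] fuel l acc
        = acc.reverse ++ l.map (fun c => if c = a then b else c) := by
  intro l
  induction l with
  | nil =>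
      intro acc fuel _
      cases fuel <;> simp [PySem.Chars.replace.go]
  | cons c t ih =>
      intro acc fuel hf
      cases fuel with
      | zero => simp at hf
      | succ fuel =>
        by_cases hca : c = a
        · subst hca
          simp only [PySem.Chars.replace.go, List.isPrefixOf, BEq.rfl, Bool.true_and,
            if_true, List.length_cons, List.drop_succ_cons, List.length_nil, List.drop_zero]
          rw [ih _ fuel (by simpa using hf)]
          simp
        · have hp : ([a].isPrefixOf (c :: t)) = false := by
            simp [List.isPrefixOf]
            exact fun h => hca h.symm
          simp only [PySem.Chars.replace.go, hp, Bool.false_eq_true, if_false]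
          rw [ih _ fuel (by simpa using hf)]
          simp [hca]

theorem replace_single (a b : Char) (s : List Char) :
    PySem.Chars.replace s [a] [b] = s.map (fun c => if c = a then b else c) := by
  simp only [PySem.Chars.replace, List.isEmpty_cons, Bool.false_eq_true, if_false]
  simpa using replace_go_single a b s [] s.length le_rfl

theorem join_nil_flatten (parts : List (List Char)) :
    PySem.Chars.join [] parts = parts.flatten := by
  simp only [PySem.Chars.join, List.intercalate]
  induction parts with
  | nil => simp
  | cons a t ih =>
      cases t with
      | nil => simp
      | cons b u => simp_all [List.intersperse]

-- A's three successive single-character substitutions compose to B's one-pass translation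
theorem tr_chain : (fun c => if (if (if c = '-' then '_' else c) = ':' then '_'
        else if c = '-' then '_' else c) = '.' then '_'
     else if (if c = '-' then '_' else c) = ':' then '_'
     else if c = '-' then '_' else c) = pvTr := by
  funext c
  unfold pvTr
  by_cases h1 : c = '-' <;> by_cases h2 : c = ':' <;> by_cases h3 : c = '.' <;> simp_all

-- ===== VERDICT (by name: the statement is the Claim_ definition above) =====
theorem change_link_name_spec : Claim_equal_change_link_name := by
  intro link _
  unfold Spec_change_link_name change_link_name change_link_name_alt
  dsimp only
  rw [PySem.List.foldl_append_eq_flatMap (fun i => '-' :: i) _ []]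
  rw [replace_single, replace_single, replace_single, join_nil_flatten]
  rw [List.nil_append, List.map_map, List.map_map, List.flatMap_def, List.map_flatten,
    List.map_map]
  simp only [Function.comp_def, List.map_cons]
  rw [tr_chain]
  simp
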